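-- pv_equiv track=rewrite | github.com/Aasthaengg/IBMdataset | Python_codes/p03488/s808040234.py | parse
-- ===== SOURCE A (Python) =====
-- def parse(s):
--     first_val = None
--     verticals, horizontals = list(), list()
--     seq = 0
--     is_horizontal = True
--     is_first = True
--     for c in s:
--         if c == 'T':
--             if is_first:
--                 first_val = seq
--                 is_first = False
--             elif is_horizontal:
--                 horizontals.append(seq)
--             else:
--                 verticals.append(seq)
--             is_horizontal = not is_horizontal
--             seq = 0
--         else:
--             seq += 1
--     if seq > 0:
--         if is_first:
--             first_val = seq
--         elif is_horizontal:
--             horizontals.append(seq)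
--         else:
--             verticals.append(seq)
--     return first_val, verticals, horizontals
-- ===== SOURCE B (Python) =====
-- def parse(s):
--     parts = s.split('T')
--     if parts[-1] == '':
--         parts.pop()
--     lens = [len(p) for p in parts]
--     first_val = lens[0] if lens else None
--     return first_val, lens[1::2], lens[2::2]
-- ===== Notes on version B (the rewrite author's own statement) =====
-- stated objective: simpler
-- what changed: Replaces the toggling first/horizontal state machine over characters by splitting the string on the separator, dropping a trailing empty segment, and distributing segment lengths by index parity (index 0 -> first_val, odd -> verticals, even >= 2 -> horizontals).
import Mathlib
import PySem

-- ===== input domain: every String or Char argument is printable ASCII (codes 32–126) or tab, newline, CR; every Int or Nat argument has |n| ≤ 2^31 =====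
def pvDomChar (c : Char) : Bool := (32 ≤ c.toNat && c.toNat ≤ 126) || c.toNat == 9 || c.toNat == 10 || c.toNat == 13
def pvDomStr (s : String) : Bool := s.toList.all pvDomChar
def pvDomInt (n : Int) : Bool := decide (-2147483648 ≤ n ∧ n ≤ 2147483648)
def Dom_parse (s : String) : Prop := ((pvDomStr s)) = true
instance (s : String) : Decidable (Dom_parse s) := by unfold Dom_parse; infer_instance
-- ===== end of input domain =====

-- B replaces A's toggling state machine over characters by split-on-'T' plus
-- index-parity distribution of segment lengths (objective: simpler).


-- ===== PORT A =====
-- A's for-loop, transcribed as structural recursion over the characters with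
-- the same six pieces of state; the [] case is the post-loop 'if seq > 0' flush.
def parseLoop : List Char → Option Int → List Int → List Int → Int → Bool → Bool →
    Option Int × List Int × List Int
  | [], fv, vs, hs, seq, hor, first =>
      if seq > 0 then
        if first then (some seq, vs, hs)
        else if hor then (fv, vs, hs ++ [seq])
        else (fv, vs ++ [seq], hs)
      else (fv, vs, hs)
  | c :: cs, fv, vs, hs, seq, hor, first =>
      if c = 'T' then
        if first then parseLoop cs (some seq) vs hs 0 (!hor) false
        else if hor then parseLoop cs fv vs (hs ++ [seq]) 0 (!hor) first
        else parseLoop cs fv (vs ++ [seq]) hs 0 (!hor) first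
      else parseLoop cs fv vs hs (seq + 1) hor first

def parse (s : String) : Option Int × List Int × List Int :=
  parseLoop s.toList none [] [] 0 true true

-- ===== PORT B =====
-- port of s.split('T'): exact for a one-character separator
def splitT : List Char → List (List Char)
  | [] => [[]]
  | c :: cs =>
      if c = 'T' then [] :: splitT cs
      else
        match splitT cs with
        | p :: ps => (c :: p) :: ps
        | [] => [[c]]   -- unreachable: splitT never returns []

-- port of "if parts[-1] == '': parts.pop()" (split output is never empty)
def dropTrailingEmpty (parts : List (List Char)) : List (List Char) :=
  if parts.getLast? = some [] then parts.dropLast else parts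

-- port of the [a::2] step-two slice used via lens[1::2] / lens[2::2]
def everyOther : List Int → List Int
  | [] => []
  | [x] => [x]
  | x :: _ :: rest => x :: everyOther rest

def parse_alt (s : String) : Option Int × List Int × List Int :=
  let parts := dropTrailingEmpty (splitT s.toList)
  let lens := parts.map (fun p => (p.length : Int))
  (lens.head?, everyOther (lens.drop 1), everyOther (lens.drop 2))

-- ===== PRECONDITION & SPEC =====
def Spec_parse (s : String) (out : Option Int × List Int × List Int) : Prop := out = parse_alt s
instance (s : String) (out : Option Int × List Int × List Int) : Decidable (Spec_parse s out) := by unfold Spec_parse; infer_instance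

-- ===== CLAIM (what is proved, stated in full; the proofs are below) =====
def Claim_equal_parse : Prop := ∀ (s : String), Dom_parse s → Spec_parse s (parse s)

-- ===== LEMMAS AND PROOFS =====

-- distributing the split segments with A's state machine (proof-only bridge)
def distrib : List (List Char) → Option Int → List Int → List Int → Int → Bool → Bool →
    Option Int × List Int × List Int
  | [], fv, vs, hs, _, _, _ => (fv, vs, hs)
  | [p], fv, vs, hs, seq, hor, first =>
      let n := seq + (p.length : Int)
      if n > 0 then
        if first then (some n, vs, hs)
        else if hor then (fv, vs, hs ++ [n])
        else (fv, vs ++ [n], hs)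
      else (fv, vs, hs)
  | p :: q :: rest, fv, vs, hs, seq, hor, first =>
      let n := seq + (p.length : Int)
      if first then distrib (q :: rest) (some n) vs hs 0 (!hor) false
      else if hor then distrib (q :: rest) fv vs (hs ++ [n]) 0 (!hor) first
      else distrib (q :: rest) fv (vs ++ [n]) hs 0 (!hor) first

theorem splitT_ne_nil (cs : List Char) : splitT cs ≠ [] := by
  cases cs with
  | nil => simp [splitT]
  | cons c cs =>
      simp only [splitT]
      split
      · simp
      · cases h : splitT cs <;> simp

theorem distrib_cons_char (c : Char) (p : List Char) (ps : List (List Char))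
    (fv : Option Int) (vs hs : List Int) (seq : Int) (hor first : Bool) :
    distrib ((c :: p) :: ps) fv vs hs seq hor first
      = distrib (p :: ps) fv vs hs (seq + 1) hor first := by
  have h : seq + ((p.length : Int) + 1) = seq + 1 + (p.length : Int) := by ring
  cases ps <;> · simp only [distrib, List.length_cons]; push_cast; rw [h]

theorem parseLoop_eq_distrib (cs : List Char) (fv : Option Int) (vs hs : List Int)
    (seq : Int) (hor first : Bool) :
    parseLoop cs fv vs hs seq hor first = distrib (splitT cs) fv vs hs seq hor first := by
  induction cs generalizing fv vs hs seq hor first with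
  | nil => simp [parseLoop, splitT, distrib]
  | cons c cs ih =>
      obtain ⟨p, ps, hps⟩ := List.exists_cons_of_ne_nil (splitT_ne_nil cs)
      by_cases hc : c = 'T'
      · subst hc
        simp only [parseLoop, splitT, hps, ih]
        conv_rhs => rw [distrib.eq_def]
        simp
      · simp only [parseLoop, splitT, if_neg hc, hps, ih, distrib_cons_char]


-- lengths of the trailing-empty-dropped segment list
def lensOf (parts : List (List Char)) : List Int :=
  (dropTrailingEmpty parts).map (fun p => (p.length : Int))

theorem dropTrailingEmpty_cons_cons (p q : List Char) (rest : List (List Char)) :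
    dropTrailingEmpty (p :: q :: rest) = p :: dropTrailingEmpty (q :: rest) := by
  simp only [dropTrailingEmpty, List.getLast?_cons_cons]
  split <;> simp_all [List.dropLast]

theorem everyOther_cons (x : Int) (l : List Int) :
    everyOther (x :: l) = x :: everyOther (l.drop 1) := by
  cases l <;> simp [everyOther]

theorem lensOf_cons_cons (p q : List Char) (rest : List (List Char)) :
    lensOf (p :: q :: rest) = (p.length : Int) :: lensOf (q :: rest) := by
  simp [lensOf, dropTrailingEmpty_cons_cons]

-- non-first phase: distrib appends parity-distributed lengths to the accumulators
theorem distrib_nonfirst (parts : List (List Char)) (hne : parts ≠ [])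
    (fv : Option Int) (vs hs : List Int) (hor : Bool) :
    distrib parts fv vs hs 0 hor false
      = (fv,
         vs ++ (if hor then everyOther ((lensOf parts).drop 1) else everyOther (lensOf parts)),
         hs ++ (if hor then everyOther (lensOf parts) else everyOther ((lensOf parts).drop 1))) := by
  induction parts generalizing fv vs hs hor with
  | nil => exact absurd rfl hne
  | cons p rest ih =>
      cases rest with
      | nil =>
          by_cases hp : p = []
          · subst hp
            simp [distrib, lensOf, dropTrailingEmpty, everyOther]
          · have hlen : (0 : Int) < (p.length : Int) := by
              exact_mod_cast List.length_pos_iff.mpr hp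
            have hgl : ¬ (List.getLast? [p] = some []) := by simp [hp]
            simp only [distrib, lensOf, dropTrailingEmpty, if_neg hgl, List.map_cons,
              List.map_nil]
            rw [if_pos (by omega : (0 : Int) + (p.length : Int) > 0)]
            cases hor <;> simp [everyOther]
      | cons q rest' =>
          have hq : q :: rest' ≠ [] := by simp
          simp only [distrib]
          rw [lensOf_cons_cons]
          cases hor with
          | true =>
              rw [if_neg (by simp), if_pos rfl, ih hq]
              simp [everyOther_cons, List.append_assoc]
          | false =>
              rw [if_neg (by simp), if_neg (by simp), ih hq]
              simp [everyOther_cons, List.append_assoc]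

theorem distrib_top (parts : List (List Char)) (hne : parts ≠ []) :
    distrib parts none [] [] 0 true true
      = ((lensOf parts).head?, everyOther ((lensOf parts).drop 1),
         everyOther ((lensOf parts).drop 2)) := by
  obtain ⟨p, rest, rfl⟩ := List.exists_cons_of_ne_nil hne
  cases rest with
  | nil =>
      by_cases hp : p = []
      · subst hp; simp [distrib, lensOf, dropTrailingEmpty, everyOther]
      · have hlen : (0 : Int) < (p.length : Int) := by
          exact_mod_cast List.length_pos_iff.mpr hp
        have hgl : ¬ (List.getLast? [p] = some []) := by simp [hp]
        simp only [distrib, lensOf, dropTrailingEmpty, if_neg hgl, List.map_cons, List.map_nil]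
        rw [if_pos (by omega : (0 : Int) + (p.length : Int) > 0)]
        simp [everyOther]
  | cons q rest' =>
      simp only [distrib, if_true, Bool.not_true]
      rw [distrib_nonfirst (q :: rest') (by simp) _ _ _ false]
      rw [lensOf_cons_cons]
      simp

-- ===== VERDICT (by name: the statement is the Claim_ definition above) =====
theorem parse_spec : Claim_equal_parse := by
  intro s _
  show parse s = parse_alt s
  unfold parse parse_alt
  rw [parseLoop_eq_distrib, distrib_top _ (splitT_ne_nil s.toList)]
  rfl
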